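-- pv_equiv track=rewrite | github.com/jdswalker/Advent-of-Code-2015 | advent_of_code/solvers/day_19.py | _get_substituted_molecules
-- ===== SOURCE A (Python) =====
-- def _get_substituted_molecules(substitutions, precursor, substitute_start):
--     """
--
--     Args:
--         substitutions (dict):
--         precursor (str):
--         substitute_start (int):
--     Returns:
--         set:
--     """
--     new_molecules = set()
--     for i in range(substitute_start, len(precursor)):
--         target_element = precursor[i]
--         if target_element in substitutions:
--             prefix = precursor[:i]
--             suffix = precursor[i + 1:]
--             for reagent in substitutions[target_element]:
--                 new_molecules.add(tuple(prefix + reagent + suffix))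
--     return new_molecules
-- ===== SOURCE B (Python) =====
-- def _get_substituted_molecules(substitutions, precursor, substitute_start):
--     # Zipper-style single pass: instead of indexing positions and re-slicing the
--     # precursor at each one, walk the tail of the string while growing the prefix,
--     # collect all candidate molecules in order, and deduplicate once at the end.
--     prefix = precursor[:substitute_start]
--     rest = precursor[substitute_start:]
--     candidates = []
--     while rest:
--         head, rest = rest[0], rest[1:]
--         for reagent in substitutions.get(head, ()):
--             candidates.append(tuple(prefix + reagent + rest))
--         prefix += head
--     return set(candidates)
-- ===== Notes on version B (the rewrite author's own statement) =====
-- stated objective: alternative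
-- what changed: Replaces A's index loop (range over positions, per-position membership test, two fresh slices and incremental set.add) by a zipper-style walk that splits the string once at substitute_start and then consumes the tail character by character while growing the prefix, collecting all candidates in one list and deduplicating with a single set() at the end.
-- outside the precondition, e.g. on _get_substituted_molecules({'a': ['b']}, 'a', -1): A returns {('b', 'a'), ('b',)}, B returns {('b',)}; on _get_substituted_molecules({'a': ['b']}, 'ba', -2): A returns {('b', 'b'), ('b', 'b', 'b', 'a')}, B returns {('b', 'b')}
import Mathlib
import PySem

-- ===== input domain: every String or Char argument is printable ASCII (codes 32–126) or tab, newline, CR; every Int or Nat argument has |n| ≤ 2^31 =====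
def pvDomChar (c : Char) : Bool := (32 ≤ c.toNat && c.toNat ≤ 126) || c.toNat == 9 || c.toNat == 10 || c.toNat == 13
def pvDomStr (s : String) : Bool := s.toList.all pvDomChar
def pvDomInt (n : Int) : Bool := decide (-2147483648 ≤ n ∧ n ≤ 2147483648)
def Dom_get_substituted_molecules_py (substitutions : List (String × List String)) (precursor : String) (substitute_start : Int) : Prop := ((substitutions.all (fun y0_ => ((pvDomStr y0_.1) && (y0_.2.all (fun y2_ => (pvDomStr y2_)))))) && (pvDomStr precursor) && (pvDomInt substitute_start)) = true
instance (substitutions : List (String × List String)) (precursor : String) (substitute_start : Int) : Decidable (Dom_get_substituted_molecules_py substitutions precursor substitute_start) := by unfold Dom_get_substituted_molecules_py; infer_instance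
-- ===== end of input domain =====

-- B replaces A's index loop (per-position membership test, two fresh slices, incremental
-- set.add) by a zipper-style walk that consumes the tail while growing the prefix and
-- deduplicates once at the end (objective: alternative decomposition, same asymptotic cost).

-- ===== PORT A =====
def get_substituted_molecules_py (substitutions : List (String × List String)) (precursor : String) (substitute_start : Int) : List (List String) :=
  (PySem.List.pyRange substitute_start (precursor.toList.length : Int) 1).foldl
    (fun new_molecules i =>
      -- target_element = precursor[i]; total form, in range under Pre_
      let target_element := String.ofList [PySem.List.pyGetD precursor.toList i ' ']
      if PySem.Dict.contains (PySem.Dict.mk substitutions) target_element then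
        let prefixT := PySem.List.slice precursor.toList none (some i)        -- precursor[:i]
        let suffixT := PySem.List.slice precursor.toList (some (i + 1)) none  -- precursor[i+1:]
        (PySem.Dict.getD (PySem.Dict.mk substitutions) target_element []).foldl
          (fun acc reagent =>
            PySem.Set.add acc ((prefixT ++ reagent.toList ++ suffixT).map (fun c => String.ofList [c])))
          new_molecules
      else new_molecules)
    PySem.Set.empty

-- ===== PORT B =====
-- the while loop of Source B: head, rest = rest[0], rest[1:]; append candidates; prefix += head
def pvWalk (subs : PySem.Dict String (List String)) : List Char → List Char → List (List String) → List (List String)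
  | _, [], candidates => candidates
  | pre, head :: rest, candidates =>
      pvWalk subs (pre ++ [head]) rest
        (candidates ++ (PySem.Dict.getD subs (String.ofList [head]) []).map
          (fun reagent => (pre ++ reagent.toList ++ rest).map (fun c => String.ofList [c])))

def get_substituted_molecules_py_alt (substitutions : List (String × List String)) (precursor : String) (substitute_start : Int) : List (List String) :=
  PySem.Set.ofList
    (pvWalk (PySem.Dict.mk substitutions)
      (PySem.List.slice precursor.toList none (some substitute_start))   -- precursor[:substitute_start]
      (PySem.List.slice precursor.toList (some substitute_start) none)   -- precursor[substitute_start:]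
      [])

-- ===== PRECONDITION & SPEC =====
-- Pre_ excludes (a) substitute_start < -len(precursor), where A raises IndexError, and
-- (b) negative substitute_start in [-len, -1] — outside the natural domain of this position
-- offset (the solver always passes 0 ≤ start); there A's negative indices wrap around, scanning
-- the tail positions twice and emitting a malformed molecule whose suffix is the whole precursor.
def Pre_get_substituted_molecules_py (substitutions : List (String × List String)) (precursor : String) (substitute_start : Int) : Prop :=
  0 ≤ substitute_start
instance (substitutions : List (String × List String)) (precursor : String) (substitute_start : Int) : Decidable (Pre_get_substituted_molecules_py substitutions precursor substitute_start) := by unfold Pre_get_substituted_molecules_py; infer_instance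
def pvWitness_get_substituted_molecules_py : (List (String × List String)) × String × Int :=
  ([("a", ["b", "xy"]), ("c", ["z"])], "abca", 1)

def Spec_get_substituted_molecules_py (substitutions : List (String × List String)) (precursor : String) (substitute_start : Int) (out : List (List String)) : Prop := out = get_substituted_molecules_py_alt substitutions precursor substitute_start
instance (substitutions : List (String × List String)) (precursor : String) (substitute_start : Int) (out : List (List String)) : Decidable (Spec_get_substituted_molecules_py substitutions precursor substitute_start out) := by unfold Spec_get_substituted_molecules_py; infer_instance

-- ===== CLAIM (what is proved, stated in full; the proofs are below) =====
def Claim_equal_get_substituted_molecules_py : Prop := ∀ (substitutions : List (String × List String)) (precursor : String) (substitute_start : Int), Dom_get_substituted_molecules_py substitutions precursor substitute_start → Pre_get_substituted_molecules_py substitutions precursor substitute_start → Spec_get_substituted_molecules_py substitutions precursor substitute_start (get_substituted_molecules_py substitutions precursor substitute_start)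

-- ===== LEMMAS AND PROOFS =====


-- the candidate block contributed by position i of cs (a Nat index)
def candAt (d : PySem.Dict String (List String)) (cs : List Char) (i : Nat) : List (List String) :=
  (PySem.Dict.getD d (String.ofList [cs.getD i ' ']) []).map
    (fun r => (cs.take i ++ r.toList ++ cs.drop (i + 1)).map (fun c => String.ofList [c]))

-- the candidate list the zipper walk produces, without the accumulator
def walkCand (d : PySem.Dict String (List String)) : List Char → List Char → List (List String)
  | _, [] => []
  | pre, h :: t =>
      ((PySem.Dict.getD d (String.ofList [h]) []).map
        (fun r => (pre ++ r.toList ++ t).map (fun c => String.ofList [c]))) ++ walkCand d (pre ++ [h]) t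

lemma walk_eq_walkCand (d : PySem.Dict String (List String)) :
    ∀ (rest pre : List Char) (acc : List (List String)),
      pvWalk d pre rest acc = acc ++ walkCand d pre rest := by
  intro rest
  induction rest with
  | nil => intro pre acc; simp [pvWalk, walkCand]
  | cons h t ih => intro pre acc; simp [pvWalk, walkCand, ih, List.append_assoc]

lemma walkCand_eq (d : PySem.Dict String (List String)) :
    ∀ (rest pre : List Char),
      walkCand d pre rest
        = (List.range rest.length).flatMap (fun k => candAt d (pre ++ rest) (pre.length + k)) := by
  intro rest
  induction rest with
  | nil => intro pre; simp [walkCand]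
  | cons h t ih =>
      intro pre
      have hget : (pre ++ h :: t).getD (pre.length + 0) ' ' = h := by
        simp [List.getD_eq_getElem?_getD]
      have htake : (pre ++ h :: t).take (pre.length + 0) = pre := by simp
      have hdrop : (pre ++ h :: t).drop (pre.length + 0 + 1) = t := by
        simp [List.drop_append]
      have hblk : ((PySem.Dict.getD d (String.ofList [h]) []).map
            (fun r => (pre ++ r.toList ++ t).map (fun c => String.ofList [c])))
          = candAt d (pre ++ h :: t) (pre.length + 0) := by
        unfold candAt
        rw [hget, htake, hdrop]
      have hfun : (fun k => candAt d (pre ++ [h] ++ t) ((pre ++ [h]).length + k))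
          = (fun k => candAt d (pre ++ h :: t) (pre.length + (k + 1))) := by
        funext k
        have h1 : pre ++ [h] ++ t = pre ++ h :: t := by simp
        have h2 : (pre ++ [h]).length + k = pre.length + (k + 1) := by simp; omega
        rw [h1, h2]
      calc walkCand d pre (h :: t)
      _ = candAt d (pre ++ h :: t) (pre.length + 0) ++ walkCand d (pre ++ [h]) t := by
            rw [walkCand, hblk]
      _ = candAt d (pre ++ h :: t) (pre.length + 0)
            ++ (List.range t.length).flatMap (fun k => candAt d (pre ++ h :: t) (pre.length + (k + 1))) := by
            rw [ih, hfun]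
      _ = _ := by
            rw [List.length_cons, List.range_succ_eq_map]
            simp [List.flatMap_cons, List.flatMap_map]

-- Folding Set.add over each per-index block in turn equals one fold over the flattened candidates.
lemma pv_foldl_add_flatMap {α : Type} [BEq α] (L : Int → List α) (R : List Int) (init : PySem.Set α) :
    R.foldl (fun s i => (L i).foldl PySem.Set.add s) init = (R.flatMap L).foldl PySem.Set.add init := by
  induction R generalizing init with
  | nil => rfl
  | cons a rest ih => simp [List.flatMap_cons, List.foldl_append, ih]

-- A's fold, rewritten as set-of-candidate-list with the membership test absorbed into getD
lemma A_eq_ofList (substitutions : List (String × List String)) (precursor : String) (substitute_start : Int) :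
    get_substituted_molecules_py substitutions precursor substitute_start
      = PySem.Set.ofList
          ((PySem.List.pyRange substitute_start (precursor.toList.length : Int) 1).flatMap (fun i =>
            (PySem.Dict.getD (PySem.Dict.mk substitutions) (String.ofList [PySem.List.pyGetD precursor.toList i ' ']) []).map
              (fun r => (PySem.List.slice precursor.toList none (some i) ++ r.toList
                          ++ PySem.List.slice precursor.toList (some (i + 1)) none).map (fun c => String.ofList [c])))) := by
  unfold get_substituted_molecules_py
  rw [PySem.Set.ofList_eq_foldl, ← pv_foldl_add_flatMap]
  show List.foldl _ (PySem.Set.empty) _ = List.foldl _ ([]) _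
  congr 1
  funext acc i
  cases h : (PySem.Dict.mk substitutions).get? (String.ofList [PySem.List.pyGetD precursor.toList i ' ']) with
  | none =>
      rw [if_neg]
      · simp [PySem.Dict.getD_eq_get?_getD, h]
      · rw [PySem.Dict.contains_eq_isSome_get?, h]; simp
  | some v =>
      rw [if_pos]
      · simp [PySem.Dict.getD_eq_get?_getD, h, List.foldl_map]
      · rw [PySem.Dict.contains_eq_isSome_get?, h]; rfl

-- the candidate list of A (over the Int range) is the candidate list of B's zipper walk, for 0 ≤ start
lemma candL_eq_walkCand (d : PySem.Dict String (List String)) (cs : List Char) (s : Int) (hs : 0 ≤ s) :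
    (PySem.List.pyRange s (cs.length : Int) 1).flatMap (fun i =>
        (PySem.Dict.getD d (String.ofList [PySem.List.pyGetD cs i ' ']) []).map
          (fun r => (PySem.List.slice cs none (some i) ++ r.toList
                      ++ PySem.List.slice cs (some (i + 1)) none).map (fun c => String.ofList [c])))
      = walkCand d (PySem.List.slice cs none (some s)) (PySem.List.slice cs (some s) none) := by
  obtain ⟨j, rfl⟩ : ∃ j : Nat, s = (j : Int) := ⟨s.toNat, by omega⟩
  rw [PySem.List.slice_to_natCast, PySem.List.slice_from_natCast, walkCand_eq, List.take_append_drop]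
  by_cases hj : j ≤ cs.length
  · have hm : ((cs.length : Int) - (j : Int)).toNat = cs.length - j := by omega
    rw [PySem.List.pyRange_one, List.flatMap_map, hm, List.length_drop]
    have hlen : (cs.take j).length = j := by simp [hj]
    rw [hlen]
    congr 1
    funext k
    have hcast : (j : Int) + (k : Int) = ((j + k : Nat) : Int) := by push_cast; ring
    have hcast1 : ((j + k : Nat) : Int) + 1 = ((j + k + 1 : Nat) : Int) := by push_cast; ring
    unfold candAt
    rw [hcast, hcast1, PySem.List.slice_to_natCast, PySem.List.slice_from_natCast,
        PySem.List.pyGetD_natCast]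
  · have h1 : PySem.List.pyRange (j : Int) (cs.length : Int) 1 = [] :=
      PySem.List.pyRange_one_eq_nil (by omega)
    have h2 : (cs.drop j).length = 0 := by simp; omega
    rw [h1, h2]
    simp

-- ===== VERDICT (by name: the statement is the Claim_ definition above) =====
theorem get_substituted_molecules_py_spec : Claim_equal_get_substituted_molecules_py := by
  intro substitutions precursor substitute_start _hdom hpre
  show get_substituted_molecules_py substitutions precursor substitute_start
      = get_substituted_molecules_py_alt substitutions precursor substitute_start
  rw [A_eq_ofList]
  unfold get_substituted_molecules_py_alt
  rw [walk_eq_walkCand, List.nil_append, candL_eq_walkCand _ _ _ hpre]
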